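-- pv_equiv track=rewrite | github.com/Jirehlov/SiglusSceneScriptUtility | src/siglus_ssu/patch.py | _collect_loc_onehop_categories
-- ===== SOURCE A (Python) =====
-- def _collect_loc_onehop_categories(call_graph, func_cats):
--     cats_by_func = {}
--     for func_off in set(call_graph) | set(func_cats):
--         cats = set(func_cats.get(func_off, ()))
--         for callee_off in call_graph.get(func_off, ()):
--             cats.update(func_cats.get(callee_off, ()))
--         if cats:
--             cats_by_func[func_off] = cats
--     return cats_by_func
-- ===== SOURCE B (Python) =====
-- def _collect_loc_onehop_categories(call_graph, func_cats):
--     # Inverted-index scatter: build a callers-of index in one edge pass, then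
--     # push each function's own categories once to itself and to all its callers.
--     callers = {}
--     for caller, callees in call_graph.items():
--         for callee in callees:
--             callers.setdefault(callee, []).append(caller)
--     result = {}
--     for func_off, cats in func_cats.items():
--         if cats:
--             for target in (func_off, *callers.get(func_off, ())):
--                 result.setdefault(target, set()).update(cats)
--     return {f: result[f] for f in sorted(result)}
-- ===== Notes on version B (the rewrite author's own statement) =====
-- stated objective: alternative
-- what changed: Replaces A's per-function gather (for each function, look up its callees and collect their categories) by an inverted index: one edge pass builds a callers-of map, then a single pass over func_cats scatters each function's categories once to itself and to all its callers; empty category lists never create entries, matching A's 'if cats' filter.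
import Mathlib
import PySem

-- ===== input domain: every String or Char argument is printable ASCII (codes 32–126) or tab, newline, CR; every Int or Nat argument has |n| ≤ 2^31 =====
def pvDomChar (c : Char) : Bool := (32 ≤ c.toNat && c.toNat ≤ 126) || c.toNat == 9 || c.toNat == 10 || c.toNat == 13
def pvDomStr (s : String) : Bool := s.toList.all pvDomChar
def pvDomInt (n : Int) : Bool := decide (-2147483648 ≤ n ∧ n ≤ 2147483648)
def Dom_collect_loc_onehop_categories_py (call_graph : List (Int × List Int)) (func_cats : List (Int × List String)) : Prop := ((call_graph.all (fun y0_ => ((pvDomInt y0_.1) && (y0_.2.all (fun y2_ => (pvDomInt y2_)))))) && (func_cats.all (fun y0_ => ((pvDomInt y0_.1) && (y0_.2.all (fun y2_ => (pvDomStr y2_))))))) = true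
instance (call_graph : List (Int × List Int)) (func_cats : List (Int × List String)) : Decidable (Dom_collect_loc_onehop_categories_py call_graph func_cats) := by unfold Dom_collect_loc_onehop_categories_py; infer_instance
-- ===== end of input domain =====

-- B replaces A's per-function gather over its callees by an inverted callers-of index that
-- scatters each function's categories once to itself and to all its callers (objective: alternative).
-- Python dicts arrive as association lists (first match = dict lookup):
def pvGetD {α : Type} : List (Int × α) → Int → α → α
  | [], _, dflt => dflt
  | (k', v) :: rest, k, dflt => if k' = k then v else pvGetD rest k dflt

-- ===== PORT A =====
-- Python iterates 'set(call_graph) | set(func_cats)' in unspecified hash order, and the values of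
-- the returned dict are Python sets (no enumeration order): both are modelled in ascending order,
-- which is legitimate because dict and set outputs are compared order-insensitively.
def collect_loc_onehop_categories_py (call_graph : List (Int × List Int)) (func_cats : List (Int × List String)) : List (Int × List String) :=
  let keys := PySem.List.sorted
    (PySem.Set.union (PySem.Set.ofList (call_graph.map Prod.fst)) (func_cats.map Prod.fst))
    (fun k => k) false
  (keys.foldl (fun (cats_by_func : PySem.Dict Int (List String)) func_off =>
      let cats := (pvGetD call_graph func_off []).foldl
        (fun cats callee_off => PySem.Set.update cats (pvGetD func_cats callee_off []))
        (PySem.Set.ofList (pvGetD func_cats func_off []))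
      if cats ≠ [] then cats_by_func.insert func_off (PySem.List.sorted cats (fun x => x) false)
      else cats_by_func)
    PySem.Dict.empty).items

-- ===== PORT B =====
-- (the final dict is keyed in sorted order by Source B itself; its set values are again
-- modelled in ascending order, compared order-insensitively)
def collect_loc_onehop_categories_py_alt (call_graph : List (Int × List Int)) (func_cats : List (Int × List String)) : List (Int × List String) :=
  let callers : PySem.Dict Int (List Int) :=
    call_graph.foldl (fun callers p =>
      p.2.foldl (fun callers callee => callers.modify callee [] (fun l => l ++ [p.1])) callers)
      PySem.Dict.empty
  let result : PySem.Dict Int (List String) :=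
    func_cats.foldl (fun result p =>
      if p.2 ≠ [] then
        (p.1 :: callers.getD p.1 []).foldl
          (fun result target => result.modify target [] (fun s => PySem.Set.update s p.2))
          result
      else result)
      PySem.Dict.empty
  (PySem.List.sorted result.keys (fun k => k) false).map
    (fun f => (f, PySem.List.sorted (result.getD f []) (fun x => x) false))

-- ===== PRECONDITION & SPEC =====
-- Pre_ requires distinct keys in both association lists: the Python arguments are dicts, which
-- cannot contain duplicate keys, so duplicate-key lists are artefacts of the List encoding and
-- the first-match dict model on them is accidental.
def Pre_collect_loc_onehop_categories_py (call_graph : List (Int × List Int)) (func_cats : List (Int × List String)) : Prop :=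
  (call_graph.map Prod.fst).Nodup ∧ (func_cats.map Prod.fst).Nodup
instance (call_graph : List (Int × List Int)) (func_cats : List (Int × List String)) : Decidable (Pre_collect_loc_onehop_categories_py call_graph func_cats) := by unfold Pre_collect_loc_onehop_categories_py; infer_instance
def pvWitness_collect_loc_onehop_categories_py : (List (Int × List Int)) × (List (Int × List String)) :=
  ([(1, [2])], [(2, ["x"])])
def Spec_collect_loc_onehop_categories_py (call_graph : List (Int × List Int)) (func_cats : List (Int × List String)) (out : List (Int × List String)) : Prop := out = collect_loc_onehop_categories_py_alt call_graph func_cats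
instance (call_graph : List (Int × List Int)) (func_cats : List (Int × List String)) (out : List (Int × List String)) : Decidable (Spec_collect_loc_onehop_categories_py call_graph func_cats out) := by unfold Spec_collect_loc_onehop_categories_py; infer_instance

-- ===== CLAIM =====
def Claim_equal_collect_loc_onehop_categories_py : Prop := ∀ (call_graph : List (Int × List Int)) (func_cats : List (Int × List String)), Dom_collect_loc_onehop_categories_py call_graph func_cats → Pre_collect_loc_onehop_categories_py call_graph func_cats → Spec_collect_loc_onehop_categories_py call_graph func_cats (collect_loc_onehop_categories_py call_graph func_cats)

-- ===== LEMMAS AND PROOFS =====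

-- the one-hop category set of a single function, as A accumulates it
def pvFull (cg : List (Int × List Int)) (fc : List (Int × List String)) (f : Int) : List String :=
  (pvGetD cg f []).foldl
    (fun cats c => PySem.Set.update cats (pvGetD fc c []))
    (PySem.Set.ofList (pvGetD fc f []))

theorem pvGetD_of_not_mem {α : Type} (d : List (Int × α)) (k : Int) (dflt : α)
    (h : k ∉ d.map Prod.fst) : pvGetD d k dflt = dflt := by
  induction d with
  | nil => rfl
  | cons p rest ih =>
    simp only [List.map_cons, List.mem_cons, not_or] at h
    simp only [pvGetD]
    rw [if_neg (fun hk => h.1 hk.symm)]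
    exact ih h.2

theorem pvGetD_eq_of_mem {α : Type} (d : List (Int × List α)) (k : Int) (v : List α)
    (hnd : (d.map Prod.fst).Nodup) (h : (k, v) ∈ d) : pvGetD d k [] = v := by
  induction d with
  | nil => cases h
  | cons p rest ih =>
    obtain ⟨k', v'⟩ := p
    simp only [List.map_cons, List.nodup_cons] at hnd
    rcases List.mem_cons.mp h with h1 | h1
    · obtain ⟨rfl, rfl⟩ := Prod.mk.injEq _ _ _ _ ▸ h1.symm
      simp [pvGetD]
    · simp only [pvGetD]
      by_cases hk : k' = k
      · exfalso
        exact hnd.1 (hk ▸ (List.mem_map.mpr ⟨(k, v), h1, rfl⟩))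
      · rw [if_neg hk]
        exact ih hnd.2 h1

theorem mem_pvGetD_iff {α : Type} (d : List (Int × List α)) (k : Int) (x : α)
    (hnd : (d.map Prod.fst).Nodup) :
    x ∈ pvGetD d k [] ↔ ∃ v, (k, v) ∈ d ∧ x ∈ v := by
  constructor
  · intro hx
    by_cases hk : k ∈ d.map Prod.fst
    · obtain ⟨⟨k1, v⟩, hmem, rfl⟩ := List.mem_map.mp hk
      exact ⟨v, hmem, (pvGetD_eq_of_mem d k1 v hnd hmem) ▸ hx⟩
    · rw [pvGetD_of_not_mem d k [] hk] at hx
      cases hx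
  · rintro ⟨v, hv, hx⟩
    rw [pvGetD_eq_of_mem d k v hnd hv]
    exact hx

theorem mem_foldl_update {α β : Type} [BEq β] [LawfulBEq β] (l : List α) (g : α → List β)
    (s : PySem.Set β) (y : β) :
    y ∈ l.foldl (fun s c => PySem.Set.update s (g c)) s ↔ y ∈ s ∨ ∃ c ∈ l, y ∈ g c := by
  induction l generalizing s with
  | nil => simp
  | cons c l ih =>
    simp only [List.foldl_cons, ih, PySem.Set.mem_update, List.mem_cons]
    constructor
    · rintro ((h | h) | ⟨c', hc', h⟩)
      · exact Or.inl h
      · exact Or.inr ⟨c, Or.inl rfl, h⟩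
      · exact Or.inr ⟨c', Or.inr hc', h⟩
    · rintro (h | ⟨c', (rfl | hc'), h⟩)
      · exact Or.inl (Or.inl h)
      · exact Or.inl (Or.inr h)
      · exact Or.inr ⟨c', hc', h⟩

theorem nodup_foldl_update {α β : Type} [BEq β] [LawfulBEq β] (l : List α) (g : α → List β)
    (s : PySem.Set β) (h : s.Nodup) :
    (l.foldl (fun s c => PySem.Set.update s (g c)) s).Nodup := by
  induction l generalizing s with
  | nil => exact h
  | cons c l ih => exact ih _ (PySem.Set.nodup_update _ _ h)

theorem mem_pvFull (cg : List (Int × List Int)) (fc : List (Int × List String)) (f : Int) (x : String) :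
    x ∈ pvFull cg fc f ↔ x ∈ pvGetD fc f [] ∨ ∃ c ∈ pvGetD cg f [], x ∈ pvGetD fc c [] := by
  unfold pvFull
  rw [mem_foldl_update]
  simp [PySem.Set.mem_ofList]

theorem nodup_pvFull (cg : List (Int × List Int)) (fc : List (Int × List String)) (f : Int) :
    (pvFull cg fc f).Nodup := by
  exact nodup_foldl_update _ _ _ (PySem.Set.nodup_ofList _)

-- A's loop appends exactly the nonempty one-hop sets, in key order
theorem pvA_fold (cg : List (Int × List Int)) (fc : List (Int × List String))
    (K : List Int) (acc : PySem.Dict Int (List String))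
    (hnd : K.Nodup) (hfresh : ∀ f ∈ K, acc.contains f = false) :
    (K.foldl (fun acc f =>
        if pvFull cg fc f ≠ [] then
          acc.insert f (PySem.List.sorted (pvFull cg fc f) (fun x => x) false)
        else acc) acc).items
      = acc.items ++ K.filterMap (fun f =>
          if pvFull cg fc f ≠ [] then
            some (f, PySem.List.sorted (pvFull cg fc f) (fun x => x) false)
          else none) := by
  induction K generalizing acc with
  | nil => simp
  | cons f K ih =>
    have hndK := hnd.of_cons
    have hne : ∀ x ∈ K, x ≠ f := fun x hx => by
      rintro rfl; exact (List.nodup_cons.mp hnd).1 hx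
    by_cases hfe : pvFull cg fc f = []
    · simp only [List.foldl_cons, List.filterMap_cons, hfe]
      rw [if_neg (by simp), if_neg (by simp)]
      exact ih acc hndK (fun x hx => hfresh x (by simp [hx]))
    · simp only [List.foldl_cons, List.filterMap_cons]
      rw [if_pos hfe, if_pos hfe]
      rw [ih (acc.insert f (PySem.List.sorted (pvFull cg fc f) (fun x => x) false)) hndK
        (fun x hx => by
          rw [PySem.Dict.contains_insert]
          simp only [Bool.or_eq_false_iff, beq_eq_false_iff_ne]
          exact ⟨hne x hx, hfresh x (by simp [hx])⟩)]
      rw [PySem.Dict.items_insert_of_not_contains (h := hfresh f (by simp))]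
      simp

-- B's callers index: contents
def pvCallers (cg : List (Int × List Int)) : PySem.Dict Int (List Int) :=
  cg.foldl (fun callers p =>
    p.2.foldl (fun callers callee => callers.modify callee [] (fun l => l ++ [p.1])) callers)
    PySem.Dict.empty

theorem mem_pvCallers_getD (cg : List (Int × List Int)) (g f : Int) :
    f ∈ (pvCallers cg).getD g [] ↔ ∃ p ∈ cg, p.1 = f ∧ g ∈ p.2 := by
  have hflat : ∀ (d0 : PySem.Dict Int (List Int)),
      cg.foldl (fun callers p =>
        p.2.foldl (fun callers callee => callers.modify callee [] (fun l => l ++ [p.1])) callers) d0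
      = (cg.flatMap (fun p => p.2.map (fun c => (c, p.1)))).foldl
          (fun d q => d.modify q.1 [] (fun l => l ++ [q.2])) d0 := by
    intro d0
    induction cg generalizing d0 with
    | nil => rfl
    | cons p rest ih =>
      simp only [List.foldl_cons, List.flatMap_cons, List.foldl_append, List.foldl_map]
      exact ih _
  unfold pvCallers
  rw [hflat, PySem.Dict.getD_foldl_modify_append]
  simp only [PySem.Dict.getD_empty, List.nil_append, List.mem_map, List.mem_filter,
    List.mem_flatMap]
  constructor
  · rintro ⟨q, ⟨⟨p, hp, c, hc, rfl⟩, hqg⟩, rfl⟩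
    simp only [beq_iff_eq] at hqg
    exact ⟨p, hp, rfl, hqg ▸ hc⟩
  · rintro ⟨p, hp, rfl, hg⟩
    exact ⟨(g, p.1), ⟨⟨p, hp, g, hg, rfl⟩, by simp⟩, rfl⟩

theorem pvSet_update_subset {α : Type} [BEq α] [LawfulBEq α] (s : PySem.Set α) (xs : List α)
    (h : ∀ x ∈ xs, x ∈ s) : PySem.Set.update s xs = s := by
  induction xs generalizing s with
  | nil => rfl
  | cons x xs ih =>
    rw [PySem.Set.update_cons, PySem.Set.add_of_mem (h x (by simp))]
    exact ih s (fun y hy => h y (by simp [hy]))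

-- one scatter step of B: push 'cats' to every target
theorem pvScatter_getD (ts : List Int) (cats : List String) (d : PySem.Dict Int (List String)) (f : Int) :
    (ts.foldl (fun d t => d.modify t [] (fun s => PySem.Set.update s cats)) d).getD f []
      = if f ∈ ts then PySem.Set.update (d.getD f []) cats else d.getD f [] := by
  induction ts generalizing d with
  | nil => simp
  | cons t ts ih =>
    have hidem : ∀ s : PySem.Set String,
        PySem.Set.update (PySem.Set.update s cats) cats = PySem.Set.update s cats :=
      fun s => pvSet_update_subset _ _ (fun x hx => (PySem.Set.mem_update _ _ _).mpr (Or.inr hx))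
    simp only [List.foldl_cons, ih, PySem.Dict.getD_modify, List.mem_cons]
    by_cases hts : f ∈ ts
    · rcases eq_or_ne f t with rfl | hft
      · simp [hts, hidem]
      · simp [hts, hft]
    · rcases eq_or_ne f t with rfl | hft
      · simp [hts]
      · simp [hts, hft]

theorem pvScatter_keys (ts : List Int) (cats : List String) (d : PySem.Dict Int (List String)) :
    (ts.foldl (fun d t => d.modify t [] (fun s => PySem.Set.update s cats)) d).keys
      = PySem.Set.update d.keys ts := by
  exact PySem.Dict.keys_foldl_modify ts [] (fun _ _ s => PySem.Set.update s cats) d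

-- B's result dict: one scatter step, then the fold
def pvStep (cg : List (Int × List Int)) (result : PySem.Dict Int (List String)) (p : Int × List String) : PySem.Dict Int (List String) :=
  if p.2 ≠ [] then
    (p.1 :: (pvCallers cg).getD p.1 []).foldl
      (fun result target => result.modify target [] (fun s => PySem.Set.update s p.2))
      result
  else result

def pvResult (cg : List (Int × List Int)) (fc : List (Int × List String)) : PySem.Dict Int (List String) :=
  fc.foldl (pvStep cg) PySem.Dict.empty

theorem pvStep_getD (cg : List (Int × List Int)) (d : PySem.Dict Int (List String))
    (p : Int × List String) (f : Int) :
    (pvStep cg d p).getD f []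
      = if p.2 ≠ [] ∧ (f = p.1 ∨ f ∈ (pvCallers cg).getD p.1 []) then
          PySem.Set.update (d.getD f []) p.2
        else d.getD f [] := by
  unfold pvStep
  by_cases hp2 : p.2 = []
  · simp [hp2]
  · rw [if_pos hp2, pvScatter_getD]
    by_cases hf : f = p.1 ∨ f ∈ (pvCallers cg).getD p.1 []
    · rw [if_pos (List.mem_cons.mpr hf), if_pos ⟨hp2, hf⟩]
    · rw [if_neg (fun h => hf (List.mem_cons.mp h)), if_neg (fun h => hf h.2)]

theorem pvStep_mem_keys (cg : List (Int × List Int)) (d : PySem.Dict Int (List String))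
    (p : Int × List String) (f : Int) :
    f ∈ (pvStep cg d p).keys
      ↔ f ∈ d.keys ∨ (p.2 ≠ [] ∧ (f = p.1 ∨ f ∈ (pvCallers cg).getD p.1 [])) := by
  unfold pvStep
  by_cases hp2 : p.2 = []
  · simp [hp2]
  · rw [if_pos hp2, pvScatter_keys, PySem.Set.mem_update, List.mem_cons]
    tauto

theorem pvStep_nodup_keys (cg : List (Int × List Int)) (d : PySem.Dict Int (List String))
    (p : Int × List String) (h : d.keys.Nodup) : (pvStep cg d p).keys.Nodup := by
  unfold pvStep
  by_cases hp2 : p.2 = []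
  · simp [hp2, h]
  · rw [if_pos hp2, pvScatter_keys]
    exact PySem.Set.nodup_update _ _ h

theorem mem_pvResult_getD (cg : List (Int × List Int)) (fc : List (Int × List String)) (f : Int) (x : String) :
    x ∈ (pvResult cg fc).getD f [] ↔
      ∃ p ∈ fc, p.2 ≠ [] ∧ (f = p.1 ∨ f ∈ (pvCallers cg).getD p.1 []) ∧ x ∈ p.2 := by
  have aux : ∀ (fcl : List (Int × List String)) (d : PySem.Dict Int (List String)),
      x ∈ (fcl.foldl (pvStep cg) d).getD f []
        ↔ x ∈ d.getD f [] ∨ ∃ p ∈ fcl, p.2 ≠ [] ∧ (f = p.1 ∨ f ∈ (pvCallers cg).getD p.1 []) ∧ x ∈ p.2 := by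
    intro fcl
    induction fcl with
    | nil => simp
    | cons p fcl ih =>
      intro d
      rw [List.foldl_cons, ih, pvStep_getD]
      by_cases hc : p.2 ≠ [] ∧ (f = p.1 ∨ f ∈ (pvCallers cg).getD p.1 [])
      · rw [if_pos hc, PySem.Set.mem_update]
        simp only [List.mem_cons]
        constructor
        · rintro ((h | h) | ⟨p', hp', h⟩)
          · exact Or.inl h
          · exact Or.inr ⟨p, Or.inl rfl, hc.1, hc.2, h⟩
          · exact Or.inr ⟨p', Or.inr hp', h⟩
        · rintro (h | ⟨p', (rfl | hp'), h⟩)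
          · exact Or.inl (Or.inl h)
          · exact Or.inl (Or.inr h.2.2)
          · exact Or.inr ⟨p', hp', h⟩
      · rw [if_neg hc]
        simp only [List.mem_cons]
        constructor
        · rintro (h | ⟨p', hp', h⟩)
          · exact Or.inl h
          · exact Or.inr ⟨p', Or.inr hp', h⟩
        · rintro (h | ⟨p', (rfl | hp'), h⟩)
          · exact Or.inl h
          · exact absurd ⟨h.1, h.2.1⟩ hc
          · exact Or.inr ⟨p', hp', h⟩
  unfold pvResult
  rw [aux]
  simp

theorem nodup_pvResult_getD (cg : List (Int × List Int)) (fc : List (Int × List String)) (f : Int) :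
    ((pvResult cg fc).getD f []).Nodup := by
  have aux : ∀ (fcl : List (Int × List String)) (d : PySem.Dict Int (List String)),
      (∀ g, (d.getD g []).Nodup) → ∀ f, ((fcl.foldl (pvStep cg) d).getD f []).Nodup := by
    intro fcl
    induction fcl with
    | nil => intro d hd f; exact hd f
    | cons p fcl ih =>
      intro d hd f
      rw [List.foldl_cons]
      refine ih _ (fun g => ?_) f
      rw [pvStep_getD]
      split_ifs with hg
      · exact PySem.Set.nodup_update _ _ (hd g)
      · exact hd g
  exact aux fc PySem.Dict.empty (fun g => by simp) f

theorem mem_pvResult_keys (cg : List (Int × List Int)) (fc : List (Int × List String)) (f : Int) :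
    f ∈ (pvResult cg fc).keys ↔
      ∃ p ∈ fc, p.2 ≠ [] ∧ (f = p.1 ∨ f ∈ (pvCallers cg).getD p.1 []) := by
  have aux : ∀ (fcl : List (Int × List String)) (d : PySem.Dict Int (List String)),
      f ∈ (fcl.foldl (pvStep cg) d).keys
        ↔ f ∈ d.keys ∨ ∃ p ∈ fcl, p.2 ≠ [] ∧ (f = p.1 ∨ f ∈ (pvCallers cg).getD p.1 []) := by
    intro fcl
    induction fcl with
    | nil => simp
    | cons p fcl ih =>
      intro d
      rw [List.foldl_cons, ih, pvStep_mem_keys]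
      simp only [List.mem_cons]
      constructor
      · rintro ((h | h) | ⟨p', hp', h⟩)
        · exact Or.inl h
        · exact Or.inr ⟨p, Or.inl rfl, h⟩
        · exact Or.inr ⟨p', Or.inr hp', h⟩
      · rintro (h | ⟨p', (rfl | hp'), h⟩)
        · exact Or.inl (Or.inl h)
        · exact Or.inl (Or.inr h)
        · exact Or.inr ⟨p', hp', h⟩
  unfold pvResult
  rw [aux]
  simp

theorem nodup_pvResult_keys (cg : List (Int × List Int)) (fc : List (Int × List String)) :
    (pvResult cg fc).keys.Nodup := by
  have aux : ∀ (fcl : List (Int × List String)) (d : PySem.Dict Int (List String)),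
      d.keys.Nodup → (fcl.foldl (pvStep cg) d).keys.Nodup := by
    intro fcl
    induction fcl with
    | nil => intro d hd; exact hd
    | cons p fcl ih =>
      intro d hd
      rw [List.foldl_cons]
      exact ih _ (pvStep_nodup_keys cg d p hd)
  exact aux fc PySem.Dict.empty (by simp)

-- value agreement (under Nodup keys)
theorem pvValue_agree (cg : List (Int × List Int)) (fc : List (Int × List String))
    (hcg : (cg.map Prod.fst).Nodup) (hfc : (fc.map Prod.fst).Nodup) (f : Int) (x : String) :
    x ∈ (pvResult cg fc).getD f [] ↔ x ∈ pvFull cg fc f := by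
  rw [mem_pvResult_getD, mem_pvFull]
  constructor
  · rintro ⟨p, hp, hne, (rfl | hcall), hx⟩
    · exact Or.inl ((pvGetD_eq_of_mem fc p.1 p.2 hfc hp).symm ▸ hx)
    · obtain ⟨q, hq, rfl, hmem⟩ := (mem_pvCallers_getD cg p.1 f).mp hcall
      refine Or.inr ⟨p.1, ?_, (pvGetD_eq_of_mem fc p.1 p.2 hfc hp).symm ▸ hx⟩
      rw [pvGetD_eq_of_mem cg q.1 q.2 hcg hq]
      exact hmem
  · rintro (hx | ⟨c, hc, hx⟩)
    · obtain ⟨v, hv, hxv⟩ := (mem_pvGetD_iff fc f x hfc).mp hx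
      exact ⟨(f, v), hv, List.ne_nil_of_mem hxv, Or.inl rfl, hxv⟩
    · obtain ⟨v, hv, hxv⟩ := (mem_pvGetD_iff fc c x hfc).mp hx
      obtain ⟨w, hw, hcw⟩ := (mem_pvGetD_iff cg f c hcg).mp hc
      refine ⟨(c, v), hv, List.ne_nil_of_mem hxv, Or.inr ?_, hxv⟩
      exact (mem_pvCallers_getD cg c f).mpr ⟨(f, w), hw, rfl, hcw⟩

-- key agreement
theorem pvKeys_agree (cg : List (Int × List Int)) (fc : List (Int × List String))
    (hcg : (cg.map Prod.fst).Nodup) (hfc : (fc.map Prod.fst).Nodup) (f : Int) :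
    f ∈ (pvResult cg fc).keys ↔ pvFull cg fc f ≠ [] := by
  constructor
  · intro hk
    obtain ⟨p, hp, hne, hcond⟩ := (mem_pvResult_keys cg fc f).mp hk
    obtain ⟨x, hx⟩ := List.exists_mem_of_ne_nil p.2 hne
    have : x ∈ (pvResult cg fc).getD f [] :=
      (mem_pvResult_getD cg fc f x).mpr ⟨p, hp, hne, hcond, hx⟩
    have hxf : x ∈ pvFull cg fc f := (pvValue_agree cg fc hcg hfc f x).mp this
    exact fun h => by rw [h] at hxf; cases hxf
  · intro hne
    obtain ⟨x, hx⟩ := List.exists_mem_of_ne_nil _ hne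
    have : x ∈ (pvResult cg fc).getD f [] := (pvValue_agree cg fc hcg hfc f x).mpr hx
    obtain ⟨p, hp, h1, h2, _⟩ := (mem_pvResult_getD cg fc f x).mp this
    exact (mem_pvResult_keys cg fc f).mpr ⟨p, hp, h1, h2⟩

theorem pvFull_ne_nil_mem_union (cg : List (Int × List Int)) (fc : List (Int × List String)) (f : Int)
    (h : pvFull cg fc f ≠ []) : f ∈ cg.map Prod.fst ∨ f ∈ fc.map Prod.fst := by
  obtain ⟨x, hx⟩ := List.exists_mem_of_ne_nil _ h
  rcases (mem_pvFull cg fc f x).mp hx with hx | ⟨c, hc, _⟩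
  · refine Or.inr (by_contra fun hmem => ?_)
    rw [pvGetD_of_not_mem fc f [] hmem] at hx
    cases hx
  · refine Or.inl (by_contra fun hmem => ?_)
    rw [pvGetD_of_not_mem cg f [] hmem] at hc
    cases hc

theorem pvFilterMap_if {v : Int → List String} (p : Int → Prop) [DecidablePred p] (K : List Int) :
    K.filterMap (fun f => if p f then some (f, v f) else none)
      = (K.filter (fun f => decide (p f))).map (fun f => (f, v f)) := by
  induction K with
  | nil => rfl
  | cons f K ih =>
    simp only [List.filterMap_cons, List.filter_cons]
    by_cases h : p f
    · simpa [h] using ih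
    · simpa [h] using ih

-- ===== VERDICT =====
theorem collect_loc_onehop_categories_py_spec : Claim_equal_collect_loc_onehop_categories_py := by
  intro cg fc _ hpre
  obtain ⟨hcg, hfc⟩ := hpre
  unfold Spec_collect_loc_onehop_categories_py
  have hA : collect_loc_onehop_categories_py cg fc
      = ((PySem.List.sorted
            (PySem.Set.union (PySem.Set.ofList (cg.map Prod.fst)) (fc.map Prod.fst))
            (fun k => k) false).foldl
          (fun acc f =>
            if pvFull cg fc f ≠ [] then
              acc.insert f (PySem.List.sorted (pvFull cg fc f) (fun x => x) false)
            else acc) PySem.Dict.empty).items := rfl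
  have hB : collect_loc_onehop_categories_py_alt cg fc
      = (PySem.List.sorted (pvResult cg fc).keys (fun k => k) false).map
          (fun f => (f, PySem.List.sorted ((pvResult cg fc).getD f []) (fun x => x) false)) := rfl
  set K := PySem.List.sorted
      (PySem.Set.union (PySem.Set.ofList (cg.map Prod.fst)) (fc.map Prod.fst))
      (fun k => k) false with hKdef
  have hKnd : K.Nodup :=
    (PySem.List.sorted_perm _ _ _).symm.nodup
      (PySem.Set.nodup_union _ _ (PySem.Set.nodup_ofList _))
  rw [hA, hB,
    pvA_fold cg fc K PySem.Dict.empty hKnd (fun f _ => PySem.Dict.contains_empty f),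
    show (PySem.Dict.empty : PySem.Dict Int (List String)).items = [] from rfl, List.nil_append,
    pvFilterMap_if (fun f => pvFull cg fc f ≠ []) K]
  have hkeys : PySem.List.sorted (pvResult cg fc).keys (fun k => k) false
      = K.filter (fun f => decide (pvFull cg fc f ≠ [])) := by
    apply PySem.List.sorted_id_eq_of_perm_of_pairwise
    · refine (List.perm_ext_iff_of_nodup (hKnd.filter _) (nodup_pvResult_keys cg fc)).mpr ?_
      intro a
      rw [List.mem_filter, pvKeys_agree cg fc hcg hfc a]
      constructor
      · rintro ⟨_, h⟩
        exact of_decide_eq_true h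
      · intro h
        refine ⟨?_, decide_eq_true h⟩
        rw [hKdef, PySem.List.mem_sorted, PySem.Set.mem_union, PySem.Set.mem_ofList]
        exact pvFull_ne_nil_mem_union cg fc a h
    · exact List.Pairwise.filter _ (PySem.List.sorted_pairwise _ _)
  rw [hkeys]
  apply List.map_congr_left
  intro f hf
  have hval : PySem.List.sorted (pvFull cg fc f) (fun x => x) false
      = PySem.List.sorted ((pvResult cg fc).getD f []) (fun x => x) false := by
    rw [PySem.List.sorted_id_eq_sorted_id_iff_perm]
    refine (List.perm_ext_iff_of_nodup (nodup_pvFull cg fc f) (nodup_pvResult_getD cg fc f)).mpr ?_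
    intro x
    exact (pvValue_agree cg fc hcg hfc f x).symm
  rw [hval]
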